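/- GENERATED by farm/mkstatement.py from design/units.tsv (unit `gif_decode.3`) and the assertions of Gif/Spec/Seg_gif_decode.lean — do not edit.
   THE STATEMENT of the proof unit `gif_decode.3`: segment 3 of `gif_decode` (40 instructions; entries 0x10aedd;
   exits 0x10af77; ranges 0x10aedd-0x10af77,0x10b027-0x10b03a)
   takes each of its entry assertions to one of its exit assertions (`Gif.Spec.gif_decode.Seg3`), given the contracts of its callees.
   What the names mean: ProgX/Base/Spec/Basic.lean (the shared hypotheses), Gif/Spec/Seg_gif_decode.lean (the assertions). The theorem to prove:
   `theorem gif_decode_3_ok : Gif.Spec.gif_decode_3.Statement`. -/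
import Gif.Code
import Gif.Dec.All
import Gif.Labels
import Gif.Spec.Seg_gif_decode
import Gif.Spec.Slurp
namespace Gif.Spec.gif_decode_3
open X86 X86.User Asan

/-- The statement of unit `gif_decode.3`. -/
def Statement : Prop :=
  ∀ (Lay : Layout) (_hLay : Lay.hi = 0x1000000) (μ : Microarch) (_hμ : UserX.MicroOK μ) (u₀ : State)
    (_hcode : HasCodeNat Lay u₀ Gif.L.gif_decode.entry Gif.Code.code_gif_decode.nat Gif.L.gif_decode.size)
    (_h_DGifSlurp : ∀ (H : Heap) (rest : List Obj) (frames : List (Nat × FrameLayout)) (F : Forest) (R : Rd), Calls Lay μ ProgX.Base.WayInv (ProgX.Base.conv u₀) Gif.L.DGifSlurp.entry (Gif.Spec.DGifSlurp.spec H rest frames F R))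
    (_h_asan_store4_noabort : Asan.SmallCheck Lay μ ProgX.Base.WayInv (ProgX.Base.CodeOK u₀) [.rax, .rcx, .rdx] 4 ProgX.Base.L.__asan_store4_noabort.entry)
    (_h_asan_load4_noabort : Asan.SmallCheck Lay μ ProgX.Base.WayInv (ProgX.Base.CodeOK u₀) [.rax, .rcx, .rdx] 4 ProgX.Base.L.__asan_load4_noabort.entry),
    Gif.Spec.gif_decode.Seg3 Lay μ u₀

end Gif.Spec.gif_decode_3
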